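-- pv_equiv track=rewrite | github.com/niyatibafna/translation-trap | utils/lang_codes.py | flores_code_to_hrln
-- ===== SOURCE A (Python) =====
-- def flores_code_to_langname(code):
--     iso3_to_lang = {
--         "eng_Latn": "English",
--         "hne_Deva": "Chhattisgarhi",
--         "bho_Deva": "Bhojpuri",
--         "mag_Deva": "Magahi",
--         "mai_Deva": "Maithili",
--         "hin_Deva": "Hindi",
--         "tam_Taml": "Tamil",
--         "tel_Telu": "Telugu",
--         "kan_Knda": "Kannada",
--         "mal_Mlym": "Malayalam",
--         "tur_Latn": "Turkish",
--         "uzn_Latn": "Uzbek",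
--         "tuk_Latn": "Turkmen",
--         "azj_Latn": "Azerbaijani",
--         "crh_Latn": "Crimean Tatar",
--         "spa_Latn": "Spanish",
--         "fra_Latn": "French",
--         "por_Latn": "Portuguese",
--         "ita_Latn": "Italian",
--         "ron_Latn": "Romanian",
--         "glg_Latn": "Galician",
--         "cat_Latn": "Catalan",
--         "oci_Latn": "Occitan",
--         "ast_Latn": "Asturian",
--         "lmo_Latn": "Lombard",
--         "vec_Latn": "Venetian",
--         "scn_Latn": "Sicilian",
--         "srd_Latn": "Sardinian",
--         "fur_Latn": "Friulian",
--         "lij_Latn": "Ligurian",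
--         "ind_Latn": "Indonesian",
--         "jav_Latn": "Javanese",
--         "sun_Latn": "Sundanese",
--         "smo_Latn": "Samoan",
--         "swh_Latn": "Swahili",
--         "mri_Latn": "Maori",
--         "mar_Deva": "Marathi",
--         "ceb_Latn": "Cebuano",
--         "zsm_Latn": "Malay",
--         "tgl_Latn": "Tagalog",
--         "ilo_Latn": "Ilokano",
--         "fij_Latn": "Fijian",
--         "plt_Latn": "Plateau Malagasy",
--         "pag_Latn": "Pangasinan",
--         "arb_Arab": "Arabic",
--         "acm_Arab": "Iraqi Arabic",
--         "acq_Arab": "Ta'izzi-Adeni Arabic",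
--         "aeb_Arab": "Tunisian Arabic",
--         "ajp_Arab": "South Levantine Arabic",
--         "apc_Arab": "North Levantine Arabic",
--         "ars_Arab": "Najdi Arabic",
--         "ary_Arab": "Moroccan Arabic",
--         "arz_Arab": "Egyptian Arabic"
--     }
--     return iso3_to_lang[code]
--
-- def flores_code_to_hrln(code):
--     hrln2crls = {
--         "hin_Deva": ["hne_Deva", "bho_Deva", "mag_Deva", "mai_Deva", "hin_Deva"],
--         "tur_Latn": ["tur_Latn", "uzn_Latn", "tuk_Latn", "azj_Latn", "crh_Latn"],
--         "ita_Latn": ["spa_Latn", "fra_Latn", "por_Latn", "ita_Latn", "ron_Latn", "glg_Latn", "cat_Latn", "oci_Latn", "ast_Latn", "lmo_Latn", "vec_Latn", "scn_Latn", "srd_Latn", "fur_Latn", "lij_Latn"],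
--         "ind_Latn": ["ind_Latn", "jav_Latn", "sun_Latn", "smo_Latn", "mri_Latn", "ceb_Latn", "zsm_Latn", "tgl_Latn", "ilo_Latn", "fij_Latn", "plt_Latn", "pag_Latn"],
--         "arb_Arab": ["arb_Arab", "acm_Arab", "acq_Arab", "aeb_Arab", "ajp_Arab", "apc_Arab", "ars_Arab", "ary_Arab", "arz_Arab", \
--                      "cai", "dam", "doh", "fes", "jer", "kha", "msa", "riy", "san", "tri", "tun"] # FloRes codes, MADAR codes
--         }
--
--     for hrln, crls in hrln2crls.items():
--         if code in crls:
--             return hrln, flores_code_to_langname(hrln)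
-- ===== SOURCE B (Python) =====
-- # Compressed cluster table (head, language name, space-separated members); a flat lookup dict
-- # is derived once by a comprehension, so the call is a single .get with no loop or scan.
-- _CLUSTERS = [
--     ("hin_Deva", "Hindi",      "hne_Deva bho_Deva mag_Deva mai_Deva hin_Deva"),
--     ("tur_Latn", "Turkish",    "tur_Latn uzn_Latn tuk_Latn azj_Latn crh_Latn"),
--     ("ita_Latn", "Italian",    "spa_Latn fra_Latn por_Latn ita_Latn ron_Latn glg_Latn cat_Latn oci_Latn ast_Latn lmo_Latn vec_Latn scn_Latn srd_Latn fur_Latn lij_Latn"),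
--     ("ind_Latn", "Indonesian", "ind_Latn jav_Latn sun_Latn smo_Latn mri_Latn ceb_Latn zsm_Latn tgl_Latn ilo_Latn fij_Latn plt_Latn pag_Latn"),
--     ("arb_Arab", "Arabic",     "arb_Arab acm_Arab acq_Arab aeb_Arab ajp_Arab apc_Arab ars_Arab ary_Arab arz_Arab cai dam doh fes jer kha msa riy san tri tun"),
-- ]
-- _LOOKUP = {c: (h, name) for h, name, members in _CLUSTERS for c in members.split()}
--
-- def flores_code_to_hrln(code):
--     return _LOOKUP.get(code)
-- ===== Notes on version B (the rewrite author's own statement) =====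
-- stated objective: simpler
-- what changed: Replaces A's per-call loop over cluster lists with membership tests by a flat lookup dict derived once (by a comprehension) from a compressed table of (head, name, space-separated members), so the call is a single .get.
import Mathlib
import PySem

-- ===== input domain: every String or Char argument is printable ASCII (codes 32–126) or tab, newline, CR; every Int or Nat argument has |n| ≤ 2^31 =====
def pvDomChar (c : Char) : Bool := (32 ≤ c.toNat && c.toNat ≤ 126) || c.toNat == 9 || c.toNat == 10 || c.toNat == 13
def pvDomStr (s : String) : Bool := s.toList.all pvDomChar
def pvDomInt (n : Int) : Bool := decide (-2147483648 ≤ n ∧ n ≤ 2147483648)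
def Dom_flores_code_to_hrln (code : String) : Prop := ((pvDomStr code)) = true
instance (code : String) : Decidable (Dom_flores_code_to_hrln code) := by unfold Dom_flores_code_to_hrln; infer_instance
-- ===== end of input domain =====

-- B replaces A's scan over cluster lists with one lookup in a flat dict derived from a compressed
-- (head, name, space-separated members) table (simpler).


-- ===== PORT A =====
-- flores_code_to_langname: Python `iso3_to_lang[code]` raises KeyError on a missing key; A only
-- calls it with keys present in the dict, so the `getD … ""` default is never reached.
def florescodetolangname (code : String) : String :=
  (PySem.Dict.ofList [
    ("eng_Latn", "English"), ("hne_Deva", "Chhattisgarhi"), ("bho_Deva", "Bhojpuri"),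
    ("mag_Deva", "Magahi"), ("mai_Deva", "Maithili"), ("hin_Deva", "Hindi"),
    ("tam_Taml", "Tamil"), ("tel_Telu", "Telugu"), ("kan_Knda", "Kannada"),
    ("mal_Mlym", "Malayalam"), ("tur_Latn", "Turkish"), ("uzn_Latn", "Uzbek"),
    ("tuk_Latn", "Turkmen"), ("azj_Latn", "Azerbaijani"), ("crh_Latn", "Crimean Tatar"),
    ("spa_Latn", "Spanish"), ("fra_Latn", "French"), ("por_Latn", "Portuguese"),
    ("ita_Latn", "Italian"), ("ron_Latn", "Romanian"), ("glg_Latn", "Galician"),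
    ("cat_Latn", "Catalan"), ("oci_Latn", "Occitan"), ("ast_Latn", "Asturian"),
    ("lmo_Latn", "Lombard"), ("vec_Latn", "Venetian"), ("scn_Latn", "Sicilian"),
    ("srd_Latn", "Sardinian"), ("fur_Latn", "Friulian"), ("lij_Latn", "Ligurian"),
    ("ind_Latn", "Indonesian"), ("jav_Latn", "Javanese"), ("sun_Latn", "Sundanese"),
    ("smo_Latn", "Samoan"), ("swh_Latn", "Swahili"), ("mri_Latn", "Maori"),
    ("mar_Deva", "Marathi"), ("ceb_Latn", "Cebuano"), ("zsm_Latn", "Malay"),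
    ("tgl_Latn", "Tagalog"), ("ilo_Latn", "Ilokano"), ("fij_Latn", "Fijian"),
    ("plt_Latn", "Plateau Malagasy"), ("pag_Latn", "Pangasinan"), ("arb_Arab", "Arabic"),
    ("acm_Arab", "Iraqi Arabic"), ("acq_Arab", "Ta'izzi-Adeni Arabic"), ("aeb_Arab", "Tunisian Arabic"),
    ("ajp_Arab", "South Levantine Arabic"), ("apc_Arab", "North Levantine Arabic"),
    ("ars_Arab", "Najdi Arabic"), ("ary_Arab", "Moroccan Arabic"), ("arz_Arab", "Egyptian Arabic")
  ]).getD code ""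

def hrln2crls : PySem.Dict String (List String) := PySem.Dict.ofList [
  ("hin_Deva", ["hne_Deva", "bho_Deva", "mag_Deva", "mai_Deva", "hin_Deva"]),
  ("tur_Latn", ["tur_Latn", "uzn_Latn", "tuk_Latn", "azj_Latn", "crh_Latn"]),
  ("ita_Latn", ["spa_Latn", "fra_Latn", "por_Latn", "ita_Latn", "ron_Latn", "glg_Latn", "cat_Latn", "oci_Latn", "ast_Latn", "lmo_Latn", "vec_Latn", "scn_Latn", "srd_Latn", "fur_Latn", "lij_Latn"]),
  ("ind_Latn", ["ind_Latn", "jav_Latn", "sun_Latn", "smo_Latn", "mri_Latn", "ceb_Latn", "zsm_Latn", "tgl_Latn", "ilo_Latn", "fij_Latn", "plt_Latn", "pag_Latn"]),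
  ("arb_Arab", ["arb_Arab", "acm_Arab", "acq_Arab", "aeb_Arab", "ajp_Arab", "apc_Arab", "ars_Arab", "ary_Arab", "arz_Arab",
                "cai", "dam", "doh", "fes", "jer", "kha", "msa", "riy", "san", "tri", "tun"])]

-- the `for hrln, crls in hrln2crls.items(): if code in crls: return …` loop, with fall-off-the-end = none
def scanA : List (String × List String) → String → Option (String × String)
  | [], _ => none
  | (hrln, crls) :: rest, code =>
      if crls.contains code then some (hrln, florescodetolangname hrln) else scanA rest code

def flores_code_to_hrln (code : String) : Option (String × String) :=
  scanA hrln2crls.items code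

-- ===== PORT B =====
-- compressed table: (cluster head, language name, space-separated member codes)
def clustersB : List (String × String × String) := [
  ("hin_Deva", "Hindi",      "hne_Deva bho_Deva mag_Deva mai_Deva hin_Deva"),
  ("tur_Latn", "Turkish",    "tur_Latn uzn_Latn tuk_Latn azj_Latn crh_Latn"),
  ("ita_Latn", "Italian",    "spa_Latn fra_Latn por_Latn ita_Latn ron_Latn glg_Latn cat_Latn oci_Latn ast_Latn lmo_Latn vec_Latn scn_Latn srd_Latn fur_Latn lij_Latn"),
  ("ind_Latn", "Indonesian", "ind_Latn jav_Latn sun_Latn smo_Latn mri_Latn ceb_Latn zsm_Latn tgl_Latn ilo_Latn fij_Latn plt_Latn pag_Latn"),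
  ("arb_Arab", "Arabic",     "arb_Arab acm_Arab acq_Arab aeb_Arab ajp_Arab apc_Arab ars_Arab ary_Arab arz_Arab cai dam doh fes jer kha msa riy san tri tun")]

-- `{c: (h, name) for h, name, members in _CLUSTERS for c in members.split()}`
def lookupB : PySem.Dict String (String × String) :=
  PySem.Dict.ofList (clustersB.flatMap fun t => (PySem.Str.split₀ t.2.2).map fun c => (c, (t.1, t.2.1)))

-- `_LOOKUP.get(code)`
def flores_code_to_hrln_alt (code : String) : Option (String × String) :=
  lookupB.get? code

-- ===== PRECONDITION & SPEC =====
def Spec_flores_code_to_hrln (code : String) (out : Option (String × String)) : Prop := out = flores_code_to_hrln_alt code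
instance (code : String) (out : Option (String × String)) : Decidable (Spec_flores_code_to_hrln code out) := by unfold Spec_flores_code_to_hrln; infer_instance

-- ===== CLAIM (what is proved, stated in full; the proofs are below) =====
def Claim_equal_flores_code_to_hrln : Prop := ∀ (code : String), Dom_flores_code_to_hrln code → Spec_flores_code_to_hrln code (flores_code_to_hrln code)

-- ===== LEMMAS AND PROOFS =====

-- assoc-lookup over a block of keys sharing one value = membership test on those keys
theorem get?_mk_map_append {α : Type} (cs : List String) (v : α) (rest : List (String × α)) (code : String) :
    (PySem.Dict.mk ((cs.map fun c => (c, v)) ++ rest)).get? code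
      = if cs.contains code then some v else (PySem.Dict.mk rest).get? code := by
  induction cs with
  | nil => simp
  | cons c cs ih =>
      by_cases h : c = code
      · subst h; simp [PySem.Dict.get?_mk_cons]
      · have h' : ¬ code = c := fun hc => h hc.symm
        simp [PySem.Dict.get?_mk_cons, h, h', ih]

-- A's scan over clusters = assoc lookup in the flattened (member ↦ (head, name(head))) list
theorem scan_eq_lookup (cls : List (String × List String)) (code : String) :
    scanA cls code
      = (PySem.Dict.mk (cls.flatMap fun p => p.2.map fun c => (c, (p.1, florescodetolangname p.1)))).get? code := by
  induction cls with
  | nil => simp [scanA, PySem.Dict.get?]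
  | cons p rest ih =>
      obtain ⟨hk, cs⟩ := p
      simp only [List.flatMap_cons, get?_mk_map_append, scanA]
      by_cases hmem : code ∈ cs
      · simp [hmem]
      · simp only [List.contains_iff_mem, hmem, if_neg, not_false_eq_true]
        exact ih

-- ===== VERDICT (by name: the statement is the Claim_ definition above) =====
set_option maxRecDepth 40000 in
theorem flores_code_to_hrln_spec : Claim_equal_flores_code_to_hrln := by
  intro code _
  show flores_code_to_hrln code = flores_code_to_hrln_alt code
  unfold flores_code_to_hrln flores_code_to_hrln_alt
  rw [scan_eq_lookup hrln2crls.items code]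
  have hrev : PySem.Dict.mk (hrln2crls.items.flatMap fun p => p.2.map fun c => (c, (p.1, florescodetolangname p.1)))
      = lookupB := by decide
  rw [hrev]
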